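-- pv_equiv track=rewrite | github.com/Khip01/sentiment-analysis | sentiment-analysis_rule-based/utils/preprocessing.py | merging_word
-- ===== SOURCE A (Python) =====
-- def merging_word(tuple_words: list[tuple[str, int]]) -> list[tuple[str, int]]:
--     # menggabungkan kata positif/negatif yang bersebelahan
--     merged_words: list[tuple[str, int]] = []
--
--     temp_word: list[str] = []
--     temp_grade: int = -2
--
--     i: int = 0
--     while i < len(tuple_words):
--         if tuple_words[i][1] != 0:
--             # merging words
--             temp_word.append(tuple_words[i][0])
--             # calculate grade
--             temp_grade = tuple_words[i][1] if temp_grade == -2 else temp_grade * tuple_words[i][1]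
--             # langsung lanjut ke kata berikutnya jika mengandung graded word
--             if i+1 < len(tuple_words) and tuple_words[i+1][1] != 0:
--                 i += 1
--                 continue
--             else:
--                 merged_words.append((" ".join(temp_word), temp_grade))
--                 # reset temporary variable
--                 temp_word = []
--                 temp_grade = -2
--                 i+=1
--         else:
--             merged_words.append((tuple_words[i][0], tuple_words[i][1]))
--             i+=1
--
--     return merged_words
-- ===== SOURCE B (Python) =====
-- def merging_word(tuple_words: list[tuple[str, int]]) -> list[tuple[str, int]]:
--     # Run-segmentation: treat the input as a stack; a zero-graded word passes
--     # through unchanged, a nonzero-graded word starts a run whose whole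
--     # adjacent nonzero tail is consumed at once, joining the words and
--     # multiplying the grades.
--     merged_words: list[tuple[str, int]] = []
--     stack = tuple_words[::-1]  # top of stack = next word
--     while stack:
--         word, grade = stack.pop()
--         if grade == 0:
--             merged_words.append((word, grade))
--         else:
--             run_words = [word]
--             run_grade = grade
--             while stack and stack[-1][1] != 0:
--                 w, g = stack.pop()
--                 run_words.append(w)
--                 run_grade *= g
--             merged_words.append((" ".join(run_words), run_grade))
--     return merged_words
-- ===== Notes on version B (the rewrite author's own statement) =====
-- stated objective: alternative
-- what changed: Replaces A's index-driven while loop with lookahead and cross-iteration temp_word/temp_grade state (and its -2 sentinel) by run segmentation: a stack is consumed run by run, each maximal nonzero run's words joined and grades simply multiplied.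
-- intended difference: On inputs where a maximal run of adjacent nonzero grades has a running product that reaches -2 before the run ends, A's 'temp_grade == -2' unset-sentinel test misfires and restarts the product (e.g. grades 2,-1,3 yield 3), while B returns the true product of the run (-6), which is the intended merged grade. — e.g. on merging_word([("a", 2), ("b", -1), ("c", 3)]): A returns [("a b c", 3)], B returns [("a b c", -6)]
import Mathlib
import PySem

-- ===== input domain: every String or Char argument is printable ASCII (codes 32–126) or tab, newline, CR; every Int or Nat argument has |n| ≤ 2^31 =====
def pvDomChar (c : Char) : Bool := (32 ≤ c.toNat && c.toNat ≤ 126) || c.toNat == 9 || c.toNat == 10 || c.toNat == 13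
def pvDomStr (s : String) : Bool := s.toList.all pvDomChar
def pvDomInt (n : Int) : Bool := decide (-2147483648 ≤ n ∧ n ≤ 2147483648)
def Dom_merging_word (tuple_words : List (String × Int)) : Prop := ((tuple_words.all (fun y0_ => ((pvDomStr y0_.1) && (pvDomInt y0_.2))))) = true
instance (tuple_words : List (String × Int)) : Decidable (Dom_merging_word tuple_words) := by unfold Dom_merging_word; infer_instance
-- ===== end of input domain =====

-- B merges each maximal run of adjacent nonzero-graded words by a run-segmentation
-- pass (stack consumed run by run, grades simply multiplied); outside D_ it returns
-- A's value, inside D_ (runs whose running product hits A's -2 sentinel) A restarts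
-- the product and B returns the true product.

-- ===== PORT A =====
-- A's while loop over index i, carrying temp_word / temp_grade / merged_words.
def mergingLoopA (tw : List (String × Int)) (i : Nat) (tempWord : List String)
    (tempGrade : Int) (merged : List (String × Int)) : List (String × Int) :=
  if _h : i < tw.length then
    let t := tw.getD i ("", 0)
    if t.2 ≠ 0 then
      let tempWord' := tempWord ++ [t.1]
      let tempGrade' := if tempGrade = -2 then t.2 else tempGrade * t.2
      if i + 1 < tw.length ∧ (tw.getD (i + 1) ("", 0)).2 ≠ 0 then
        mergingLoopA tw (i + 1) tempWord' tempGrade' merged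
      else
        mergingLoopA tw (i + 1) [] (-2) (merged ++ [(PySem.Str.join " " tempWord', tempGrade')])
    else
      mergingLoopA tw (i + 1) tempWord tempGrade (merged ++ [t])
  else merged
termination_by tw.length - i

def merging_word (tuple_words : List (String × Int)) : List (String × Int) :=
  mergingLoopA tuple_words 0 [] (-2) []

-- ===== PORT B =====
-- B's inner loop: pop the rest of the current nonzero run off the stack,
-- collecting its words and multiplying its grades.
def collectRun (stack : List (String × Int)) (runWords : List String) (runGrade : Int) :
    List String × Int × List (String × Int) :=
  match stack with
  | [] => (runWords, runGrade, [])
  | (w, g) :: rest =>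
      if g ≠ 0 then collectRun rest (runWords ++ [w]) (runGrade * g)
      else (runWords, runGrade, (w, g) :: rest)

theorem collectRun_rest_le (stack : List (String × Int)) (runWords : List String) (runGrade : Int) :
    (collectRun stack runWords runGrade).2.2.length ≤ stack.length := by
  induction stack generalizing runWords runGrade with
  | nil => simp [collectRun]
  | cons t rest ih =>
      obtain ⟨w, g⟩ := t
      by_cases hg : g ≠ 0
      · simp only [collectRun, if_pos hg]
        exact le_trans (ih _ _) (by simp)
      · simp [collectRun, hg]

-- B's outer loop: the stack is consumed word by word; a nonzero-graded word starts a run.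
def mergingLoopB (stack : List (String × Int)) : List (String × Int) :=
  match stack with
  | [] => []
  | (w, g) :: rest =>
      if g = 0 then (w, g) :: mergingLoopB rest
      else
        (PySem.Str.join " " (collectRun rest [w] g).1, (collectRun rest [w] g).2.1)
          :: mergingLoopB (collectRun rest [w] g).2.2
termination_by stack.length
decreasing_by all_goals (have := collectRun_rest_le rest [w] g; simp only [List.length_cons]; omega)

def merging_word_alt (tuple_words : List (String × Int)) : List (String × Int) :=
  mergingLoopB tuple_words

-- ===== PRECONDITION & SPEC =====
-- On inputs containing a maximal run of adjacent nonzero grades whose running product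
-- reaches -2 before the run ends (some run start i — i.e. i = 0 or grade i-1 is 0 —
-- has grades i..i+t with product -2 and a nonzero grade at i+t+1), A's
-- `temp_grade == -2` sentinel test misfires and restarts the product (grades 2,-1,3
-- give 3), while B returns the true product of the run (-6), the intended merged grade.
def D_merging_word (tuple_words : List (String × Int)) : Prop :=
  let gs := tuple_words.map Prod.snd
  ∃ i < gs.length, ∃ t < gs.length,
    (i = 0 ∨ gs.getD (i - 1) 0 = 0) ∧
    ((gs.drop i).take (t + 1)).prod = -2 ∧ gs.getD (i + t + 1) 0 ≠ 0
instance (tuple_words : List (String × Int)) : Decidable (D_merging_word tuple_words) := by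
  unfold D_merging_word; infer_instance

def Spec_merging_word (tuple_words : List (String × Int)) (out : List (String × Int)) : Prop := ¬ D_merging_word tuple_words → out = merging_word_alt tuple_words
instance (tuple_words : List (String × Int)) (out : List (String × Int)) : Decidable (Spec_merging_word tuple_words out) := by unfold Spec_merging_word; infer_instance

def pvDiffWitness_merging_word : (List (String × Int)) := [("a", 2), ("b", -1), ("c", 3)]
def pvDiffWitnessOut_merging_word : (List (String × Int)) × (List (String × Int)) :=
  ([("a b c", 3)], [("a b c", -6)])

-- ===== CLAIM (what is proved, stated in full; the proofs are below) =====
def Claim_unchanged_merging_word : Prop := ∀ (tuple_words : List (String × Int)), Dom_merging_word tuple_words → Spec_merging_word tuple_words (merging_word tuple_words)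
def Claim_changed_merging_word : Prop := Dom_merging_word (pvDiffWitness_merging_word) ∧ D_merging_word (pvDiffWitness_merging_word) ∧ merging_word (pvDiffWitness_merging_word) = pvDiffWitnessOut_merging_word.1 ∧ merging_word_alt (pvDiffWitness_merging_word) = pvDiffWitnessOut_merging_word.2 ∧ pvDiffWitnessOut_merging_word.1 ≠ pvDiffWitnessOut_merging_word.2
def Claim_exact_merging_word : Prop := ∀ (tuple_words : List (String × Int)), Dom_merging_word tuple_words → D_merging_word tuple_words → merging_word tuple_words ≠ merging_word_alt tuple_words

-- ===== LEMMAS AND PROOFS =====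

-- grade of the k-th word (0 when out of range), and its reading off the grade sequence
def gradeAt (tw : List (String × Int)) (k : Nat) : Int := (tw.getD k ("", 0)).2

theorem getD_map_snd (tw : List (String × Int)) (k : Nat) :
    (tw.map Prod.snd).getD k 0 = gradeAt tw k := by
  simp only [gradeAt, List.getD, List.getElem?_map]
  cases tw[k]? <;> simp

theorem take_drop_map_snd (tw : List (String × Int)) (r m : Nat) (h : r + m ≤ tw.length) :
    ((tw.map Prod.snd).drop r).take m = (List.range m).map fun d => gradeAt tw (r + d) := by
  apply List.ext_getElem
  · simp; omega
  · intro d h1 h2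
    simp only [List.getElem_take, List.getElem_drop, List.getElem_map, List.getElem_range]
    have hd : d < m := by simpa using h2
    have : r + d < tw.length := by omega
    rw [gradeAt, List.getD_eq_getElem tw ("", 0) this]

-- proof-side scanner: the sentinel never misfires from a fresh / mid-run state
mutual
def okRun : Int → List (String × Int) → Bool
  | _, [] => true
  | p, (_, g) :: rest => if g ≠ 0 then decide (p ≠ -2) && okRun (p * g) rest else okFresh rest
def okFresh : List (String × Int) → Bool
  | [] => true
  | (_, g) :: rest => if g ≠ 0 then okRun g rest else okFresh rest
end

-- A's index loop, restated as structural recursion on the suffix it still has to read.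
def mergingLoopL (l : List (String × Int)) (tempWord : List String)
    (tempGrade : Int) (merged : List (String × Int)) : List (String × Int) :=
  match l with
  | [] => merged
  | t :: rest =>
      if t.2 ≠ 0 then
        let tempWord' := tempWord ++ [t.1]
        let tempGrade' := if tempGrade = -2 then t.2 else tempGrade * t.2
        if rest ≠ [] ∧ (rest.headD ("", 0)).2 ≠ 0 then
          mergingLoopL rest tempWord' tempGrade' merged
        else
          mergingLoopL rest [] (-2) (merged ++ [(PySem.Str.join " " tempWord', tempGrade')])
      else
        mergingLoopL rest tempWord tempGrade (merged ++ [t])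

theorem mergingLoopA_eq_L (tw : List (String × Int)) (i : Nat) (ws : List String)
    (g : Int) (acc : List (String × Int)) :
    mergingLoopA tw i ws g acc = mergingLoopL (tw.drop i) ws g acc := by
  suffices H : ∀ n i ws g acc, tw.length - i ≤ n →
      mergingLoopA tw i ws g acc = mergingLoopL (tw.drop i) ws g acc from
    H tw.length i ws g acc (by omega)
  intro n
  induction n with
  | zero =>
      intro i ws g acc h
      have hi : ¬ i < tw.length := by omega
      rw [mergingLoopA, List.drop_eq_nil_of_le (by omega)]
      simp [hi, mergingLoopL]
  | succ n ih =>
      intro i ws g acc h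
      by_cases hi : i < tw.length
      · have hdrop : tw.drop i = tw[i] :: tw.drop (i + 1) := List.drop_eq_getElem_cons hi
        have hget : tw.getD i ("", 0) = tw[i] := List.getD_eq_getElem tw ("", 0) hi
        have hne : (tw.drop (i + 1) ≠ [] ∧ ((tw.drop (i + 1)).headD ("", 0)).2 ≠ 0) ↔
            (i + 1 < tw.length ∧ (tw.getD (i + 1) ("", 0)).2 ≠ 0) := by
          constructor
          · rintro ⟨h1, h2⟩
            have hlt : i + 1 < tw.length := by
              by_contra hcon
              exact h1 (List.drop_eq_nil_of_le (by omega))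
            refine ⟨hlt, ?_⟩
            rwa [List.headD_eq_head?_getD, List.head?_drop, ← List.getD_eq_getElem?_getD] at h2
          · rintro ⟨h1, h2⟩
            refine ⟨by simp [List.drop_eq_nil_iff]; omega, ?_⟩
            rwa [List.headD_eq_head?_getD, List.head?_drop, ← List.getD_eq_getElem?_getD]
        rw [mergingLoopA, hdrop, mergingLoopL]
        simp only [hi, dif_pos, hget]
        by_cases hz : (tw[i] : String × Int).2 ≠ 0
        · simp only [if_pos hz]
          by_cases hla : i + 1 < tw.length ∧ (tw.getD (i + 1) ("", 0)).2 ≠ 0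
          · rw [if_pos hla, if_pos (hne.mpr hla), ih (i + 1) _ _ _ (by omega)]
          · rw [if_neg hla, if_neg (fun hc => hla (hne.mp hc)), ih (i + 1) _ _ _ (by omega)]
        · simp only [if_neg hz]
          rw [ih (i + 1) _ _ _ (by omega)]
      · rw [mergingLoopA, List.drop_eq_nil_of_le (by omega)]
        simp [hi, mergingLoopL]

-- When the scanner accepts, A's fold of a run equals B's plain product.
theorem loopL_eq_B (l : List (String × Int)) :
    (okFresh l = true → ∀ acc, mergingLoopL l [] (-2) acc = acc ++ mergingLoopB l) ∧
    (∀ ws p acc t rest, l = t :: rest → t.2 ≠ 0 → okRun p l = true →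
      mergingLoopL l ws p acc =
        acc ++ (PySem.Str.join " " (collectRun l ws p).1, (collectRun l ws p).2.1)
            :: mergingLoopB (collectRun l ws p).2.2) := by
  suffices H : ∀ n (l : List (String × Int)), l.length ≤ n →
      (okFresh l = true → ∀ acc, mergingLoopL l [] (-2) acc = acc ++ mergingLoopB l) ∧
      (∀ ws p acc t rest, l = t :: rest → t.2 ≠ 0 → okRun p l = true →
        mergingLoopL l ws p acc =
          acc ++ (PySem.Str.join " " (collectRun l ws p).1, (collectRun l ws p).2.1)
              :: mergingLoopB (collectRun l ws p).2.2) from H l.length l le_rfl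
  intro n
  induction n with
  | zero =>
      intro l h
      have hl : l = [] := List.length_eq_zero_iff.mp (by omega)
      subst hl
      exact ⟨fun _ acc => by simp [mergingLoopL, mergingLoopB], by rintro _ _ _ _ _ ⟨⟩⟩
  | succ n ih =>
      intro l h
      constructor
      · -- fresh state: the next run (if the head is graded) matches B's outer step
        intro hF acc
        match l, h, hF with
        | [], _, _ => simp [mergingLoopL, mergingLoopB]
        | (w, g) :: rest, h, hF =>
          have hrest : rest.length ≤ n := by simpa using h
          by_cases hg : g = 0
          · subst hg
            have hF' : okFresh rest = true := by simpa [okFresh] using hF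
            rw [mergingLoopL, mergingLoopB,
              if_neg (show ¬((w, (0 : Int)) : String × Int).2 ≠ 0 by simp), if_pos rfl,
              (ih rest hrest).1 hF']
            simp
          · have hR : okRun g rest = true := by simpa [okFresh, hg] using hF
            rw [mergingLoopL, mergingLoopB]
            rw [if_pos (show ((w, g) : String × Int).2 ≠ 0 from hg),
              if_pos (show (-2 : Int) = -2 from rfl), if_neg hg]
            simp only [List.nil_append]
            match rest, hR with
            | [], _ =>
                rw [if_neg (by simp), mergingLoopL]
                simp [collectRun, mergingLoopB]
            | (w1, g1) :: rest', hR =>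
                by_cases hg1 : g1 = 0
                · have hF'' : okFresh ((w1, g1) :: rest') = true := by
                    subst hg1; simpa [okRun, okFresh] using hR
                  rw [if_neg (by simp [hg1]), (ih _ hrest).1 hF'']
                  subst hg1
                  simp [collectRun, mergingLoopB]
                · rw [if_pos (by simp [hg1]),
                    (ih _ hrest).2 [w] g acc (w1, g1) rest' rfl hg1 hR]
      · -- mid-run state: A keeps folding the run B's collectRun collects
        rintro ws p acc ⟨w, g⟩ rest rfl hg hR
        simp only at hg
        have hp : p ≠ -2 ∧ okRun (p * g) rest = true := by
          have := hR
          rw [okRun, if_pos hg, Bool.and_eq_true, decide_eq_true_iff] at this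
          exact this
        rw [mergingLoopL, if_pos (show ((w, g) : String × Int).2 ≠ 0 from hg)]
        simp only []
        have hC : collectRun ((w, g) :: rest) ws p
            = collectRun rest (ws ++ [w]) (p * g) := by
          rw [collectRun, if_pos hg]
        rw [hC, if_neg hp.1]
        have hrest : rest.length ≤ n := by simpa using h
        match rest, hp with
        | [], _ =>
            rw [if_neg (by simp), mergingLoopL]
            simp [collectRun, mergingLoopB]
        | (w1, g1) :: rest', hp =>
            by_cases hg1 : g1 = 0
            · have hF'' : okFresh ((w1, g1) :: rest') = true := by
                subst hg1; simpa [okRun, okFresh] using hp.2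
              rw [if_neg (by simp [hg1]), (ih _ hrest).1 hF'']
              subst hg1
              simp [collectRun, mergingLoopB]
            · rw [if_pos (by simp [hg1]),
                (ih _ hrest).2 (ws ++ [w]) (p * g) acc (w1, g1) rest' rfl hg1 hp.2]

-- The scanner accepts whenever no run segment of the input violates runSeg.
theorem okAux (tw : List (String × Int))
    (hseg : ∀ i t, i < tw.length → t < tw.length →
      ¬((i = 0 ∨ (tw.map Prod.snd).getD (i - 1) 0 = 0) ∧
        (((tw.map Prod.snd).drop i).take (t + 1)).prod = -2 ∧
        (tw.map Prod.snd).getD (i + t + 1) 0 ≠ 0)) :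
    ∀ n s, tw.length - s ≤ n →
      ((s = 0 ∨ gradeAt tw (s - 1) = 0) → okFresh (tw.drop s) = true) ∧
      (∀ r, r < s → (r = 0 ∨ gradeAt tw (r - 1) = 0) →
        (∀ k, r ≤ k → k < s → gradeAt tw k ≠ 0) →
        okRun (((List.range (s - r)).map fun d => gradeAt tw (r + d)).prod) (tw.drop s) = true) := by
  intro n
  induction n with
  | zero =>
      intro s hs
      have : tw.drop s = [] := List.drop_eq_nil_of_le (by omega)
      rw [this]
      exact ⟨fun _ => rfl, fun _ _ _ _ => rfl⟩
  | succ n ih =>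
      intro s hs
      by_cases hlt : s < tw.length
      · have hdrop : tw.drop s = tw[s] :: tw.drop (s + 1) := List.drop_eq_getElem_cons hlt
        have hgs : gradeAt tw s = (tw[s]'hlt).2 := by
          rw [gradeAt, List.getD_eq_getElem tw ("", 0) hlt]
        constructor
        · intro hb
          rw [hdrop]
          rcases hts : tw[s] with ⟨w, g⟩
          rw [okFresh]
          by_cases hg : g = 0
          · rw [if_neg (by simpa using hg)]
            exact (ih (s + 1) (by omega)).1 (Or.inr (by simpa [hgs, hts] using hg))
          · rw [if_pos (by simpa using hg)]
            have := (ih (s + 1) (by omega)).2 s (by omega) hb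
              (fun k h1 h2 => by
                have : k = s := by omega
                subst this
                rw [hgs, hts]; simpa using hg)
            simpa [show s + 1 - s = 1 from by omega, List.range_succ, hgs, hts] using this
        · intro r hr hb hnz
          rw [hdrop]
          rcases hts : tw[s] with ⟨w, g⟩
          rw [okRun]
          by_cases hg : g = 0
          · rw [if_neg (by simpa using hg)]
            exact (ih (s + 1) (by omega)).1 (Or.inr (by simpa [hgs, hts] using hg))
          · rw [if_pos (by simpa using hg)]
            have hP : (((List.range (s - r)).map fun d => gradeAt tw (r + d)).prod) ≠ -2 := by
              intro hPc
              have hfalse := hseg r (s - 1 - r) (by omega) (by omega)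
              apply hfalse
              have ht1 : s - 1 - r + 1 = s - r := by omega
              have ht2 : r + (s - 1 - r) + 1 = s := by omega
              refine ⟨?_, ?_, ?_⟩
              · rcases hb with hb | hb
                · exact Or.inl hb
                · exact Or.inr (by rw [getD_map_snd]; exact hb)
              · rw [ht1, take_drop_map_snd tw r (s - r) (by omega)]
                exact hPc
              · rw [ht2, getD_map_snd, hgs, hts]
                simpa using hg
            rw [Bool.and_eq_true, decide_eq_true_iff]
            refine ⟨hP, ?_⟩
            have := (ih (s + 1) (by omega)).2 r (by omega) hb
              (fun k h1 h2 => by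
                by_cases hk : k = s
                · subst hk; rw [hgs, hts]; simpa using hg
                · exact hnz k h1 (by omega))
            have hprod : ((List.range (s + 1 - r)).map fun d => gradeAt tw (r + d)).prod
                = (((List.range (s - r)).map fun d => gradeAt tw (r + d)).prod) * g := by
              have h2 : s + 1 - r = (s - r) + 1 := by omega
              rw [h2, List.range_succ]
              simp [show r + (s - r) = s from by omega, hgs, hts]
            rw [hprod] at this
            exact this
      · have : tw.drop s = [] := List.drop_eq_nil_of_le (by omega)
        rw [this]
        exact ⟨fun _ => rfl, fun _ _ _ _ => rfl⟩

-- The scanner only rejects inputs inside D_.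
theorem okFresh_of_notD (tw : List (String × Int)) (hD : ¬ D_merging_word tw) :
    okFresh tw = true := by
  have hseg : ∀ i t, i < tw.length → t < tw.length →
      ¬((i = 0 ∨ (tw.map Prod.snd).getD (i - 1) 0 = 0) ∧
        (((tw.map Prod.snd).drop i).take (t + 1)).prod = -2 ∧
        (tw.map Prod.snd).getD (i + t + 1) 0 ≠ 0) := by
    intro i t hi ht hcon
    apply hD
    unfold D_merging_word
    exact ⟨i, by simpa using hi, t, by simpa using ht, hcon⟩
  simpa using (okAux tw hseg tw.length 0 (by omega)).1 (Or.inl rfl)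

-- ===== run decomposition (for the tightness proof) =====
def runWordsL (l : List (String × Int)) : List String :=
  (l.takeWhile fun t => decide (t.2 ≠ 0)).map Prod.fst
def runGradesL (l : List (String × Int)) : List Int :=
  (l.takeWhile fun t => decide (t.2 ≠ 0)).map Prod.snd
def remRunL (l : List (String × Int)) : List (String × Int) :=
  l.dropWhile fun t => decide (t.2 ≠ 0)
def stepFold (p : Int) (gs : List Int) : Int :=
  gs.foldl (fun q g => if q = -2 then g else q * g) p
def scanOk : Int → List Int → Bool
  | _, [] => true
  | p, g :: gs => decide (p ≠ -2) && scanOk (if p = -2 then g else p * g) gs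

theorem stepFold_cons (p g : Int) (gs : List Int) :
    stepFold p (g :: gs) = stepFold (if p = -2 then g else p * g) gs := rfl

-- A's loop only ever appends to its accumulator
theorem loopL_acc (l : List (String × Int)) :
    ∀ ws p acc, mergingLoopL l ws p acc = acc ++ mergingLoopL l ws p [] := by
  induction l with
  | nil => intro ws p acc; simp [mergingLoopL]
  | cons t rest ih =>
      intro ws p acc
      rw [mergingLoopL, mergingLoopL]
      by_cases h1 : t.2 ≠ 0
      · rw [if_pos h1, if_pos h1]
        by_cases h2 : rest ≠ [] ∧ (rest.headD ("", 0)).2 ≠ 0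
        · rw [if_pos h2, if_pos h2, ih _ _ acc]
        · rw [if_neg h2, if_neg h2,
            ih _ _ (acc ++ [(PySem.Str.join " " (ws ++ [t.1]), if p = -2 then t.2 else p * t.2)]),
            ih _ _ ([] ++ [(PySem.Str.join " " (ws ++ [t.1]), if p = -2 then t.2 else p * t.2)])]
          simp
      · rw [if_neg h1, if_neg h1, ih _ _ (acc ++ [t]), ih _ _ ([] ++ [t])]
        simp

-- A processes one whole nonzero run per output tuple, folding its grades with stepFold
theorem loopL_run (l : List (String × Int)) :
    ∀ w g rest, l = (w, g) :: rest → g ≠ 0 → ∀ ws p acc,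
      mergingLoopL l ws p acc =
        mergingLoopL (remRunL l) [] (-2)
          (acc ++ [(PySem.Str.join " " (ws ++ runWordsL l), stepFold p (runGradesL l))]) := by
  induction l with
  | nil => intro w g rest h; cases h
  | cons t tl ih =>
      rintro w g rest h hg ws p acc
      injection h with h1 h2
      subst h1; subst h2
      have hrw : runWordsL ((w, g) :: tl) = w :: runWordsL tl := by
        simp [runWordsL, List.takeWhile_cons, hg]
      have hrg : runGradesL ((w, g) :: tl) = g :: runGradesL tl := by
        simp [runGradesL, List.takeWhile_cons, hg]
      rw [mergingLoopL, if_pos (show ((w, g) : String × Int).2 ≠ 0 from hg)]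
      simp only []
      by_cases h2 : tl ≠ [] ∧ (tl.headD ("", 0)).2 ≠ 0
      · obtain ⟨w1, g1, tl', rfl⟩ : ∃ w1 g1 tl', tl = (w1, g1) :: tl' := by
          match tl, h2 with
          | (w1, g1) :: tl', _ => exact ⟨w1, g1, tl', rfl⟩
        have hg1 : g1 ≠ 0 := by simpa using h2.2
        rw [if_pos h2, ih w1 g1 tl' rfl hg1 (ws ++ [w]) (if p = -2 then g else p * g) acc]
        have hrem : remRunL ((w, g) :: (w1, g1) :: tl') = remRunL ((w1, g1) :: tl') := by
          simp [remRunL, List.dropWhile_cons, hg]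
        rw [hrem, hrw, hrg, stepFold_cons]
        simp
      · rw [if_neg h2]
        have htl : tl = [] ∨ (tl.headD ("", 0)).2 = 0 := by
          by_cases hn : tl = []
          · exact Or.inl hn
          · exact Or.inr (by by_contra hc; exact h2 ⟨hn, hc⟩)
        have htake : tl.takeWhile (fun t => decide (t.2 ≠ 0)) = [] := by
          rcases htl with hn | hz
          · simp [hn]
          · match tl, hz with
            | [], _ => rfl
            | (w1, g1) :: tl', hz =>
                simp only [List.headD_cons] at hz
                simp [List.takeWhile_cons, hz]
        have hrem : remRunL ((w, g) :: tl) = tl := by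
          rcases htl with hn | hz
          · simp [remRunL, List.dropWhile_cons, hg, hn]
          · match tl, hz with
            | [], _ => simp [remRunL, List.dropWhile_cons, hg]
            | (w1, g1) :: tl', hz =>
                simp only [List.headD_cons] at hz
                simp [remRunL, List.dropWhile_cons, hg, hz]
        rw [hrem, hrw, hrg, stepFold_cons]
        simp only [runWordsL, runGradesL, htake, List.map_nil]
        simp [stepFold]

-- B's inner loop computes the run words, the plain product, and the remainder
theorem collectRun_eq (l : List (String × Int)) :
    ∀ ws p, collectRun l ws p = (ws ++ runWordsL l, p * (runGradesL l).prod, remRunL l) := by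
  induction l with
  | nil => intro ws p; simp [collectRun, runWordsL, runGradesL, remRunL]
  | cons t tl ih =>
      rintro ws p
      obtain ⟨w, g⟩ := t
      by_cases hg : g = 0
      · subst hg
        simp [collectRun, runWordsL, runGradesL, remRunL, List.takeWhile_cons,
          List.dropWhile_cons]
      · rw [collectRun, if_pos hg, ih]
        simp [runWordsL, runGradesL, remRunL, List.takeWhile_cons, List.dropWhile_cons, hg,
          mul_assoc]

-- the scanner on a run-start state, factored through the run decomposition
theorem okRun_eq (l : List (String × Int)) :
    ∀ p, okRun p l = (scanOk p (runGradesL l) && okFresh (remRunL l)) := by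
  induction l with
  | nil => intro p; simp [okRun, scanOk, runGradesL, remRunL, okFresh]
  | cons t tl ih =>
      intro p
      obtain ⟨w, g⟩ := t
      by_cases hg : g = 0
      · subst hg
        simp [okRun, scanOk, runGradesL, remRunL, List.takeWhile_cons, List.dropWhile_cons,
          okFresh]
      · rw [okRun, if_pos hg]
        have hrg : runGradesL ((w, g) :: tl) = g :: runGradesL tl := by
          simp [runGradesL, List.takeWhile_cons, hg]
        have hrem : remRunL ((w, g) :: tl) = remRunL tl := by
          simp [remRunL, List.dropWhile_cons, hg]
        rw [hrg, hrem, scanOk]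
        by_cases hp : p = -2
        · simp [hp]
        · simp only [hp, if_neg hp, decide_not, ih]
          simp [Bool.and_assoc]

theorem runGradesL_nonzero (l : List (String × Int)) :
    ∀ g ∈ runGradesL l, g ≠ 0 := by
  intro g hgmem
  obtain ⟨t, ht, rfl⟩ := List.mem_map.mp hgmem
  have := List.mem_takeWhile_imp ht
  simpa using this

theorem prod_nonzero (gs : List Int) (h : ∀ g ∈ gs, g ≠ 0) : gs.prod ≠ 0 := by
  induction gs with
  | nil => simp
  | cons g gs ih =>
      simp only [List.prod_cons]
      exact mul_ne_zero (h g (by simp)) (ih fun x hx => h x (by simp [hx]))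

-- a clean scan: the fold is the plain product
theorem stepFold_of_scanOk (gs : List Int) :
    ∀ p, scanOk p gs = true → stepFold p gs = p * gs.prod := by
  induction gs with
  | nil => intro p _; simp [stepFold]
  | cons g gs ih =>
      intro p h
      rw [scanOk, Bool.and_eq_true, decide_eq_true_iff] at h
      rw [stepFold_cons, if_neg h.1, ih _ (by simpa [if_neg h.1] using h.2)]
      simp [mul_assoc]

theorem natAbs_stepFold_le (gs : List Int) :
    ∀ p, p ≠ 0 → (∀ g ∈ gs, g ≠ 0) → (stepFold p gs).natAbs ≤ (p * gs.prod).natAbs := by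
  induction gs with
  | nil => intro p _ _; simp [stepFold]
  | cons g gs ih =>
      intro p hp hz
      have hg : g ≠ 0 := hz g (by simp)
      have hz' : ∀ x ∈ gs, x ≠ 0 := fun x hx => hz x (by simp [hx])
      rw [stepFold_cons]
      by_cases hp2 : p = -2
      · rw [if_pos hp2]
        calc (stepFold g gs).natAbs ≤ (g * gs.prod).natAbs := ih g hg hz'
          _ ≤ (p * (g :: gs).prod).natAbs := by
              subst hp2
              rw [List.prod_cons]
              have h4 : ((-2 : Int) * (g * gs.prod)).natAbs = 2 * (g * gs.prod).natAbs := by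
                rw [Int.natAbs_mul]; norm_num
              rw [h4]
              omega
      · rw [if_neg hp2]
        calc (stepFold (p * g) gs).natAbs ≤ ((p * g) * gs.prod).natAbs :=
              ih (p * g) (mul_ne_zero hp hg) hz'
          _ = (p * (g :: gs).prod).natAbs := by rw [List.prod_cons, mul_assoc]

-- a failing scan strictly shrinks the absolute value
theorem natAbs_stepFold_lt (gs : List Int) :
    ∀ p, p ≠ 0 → (∀ g ∈ gs, g ≠ 0) → scanOk p gs = false →
      (stepFold p gs).natAbs < (p * gs.prod).natAbs := by
  induction gs with
  | nil => intro p _ _ h; simp [scanOk] at h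
  | cons g gs ih =>
      intro p hp hz h
      have hg : g ≠ 0 := hz g (by simp)
      have hz' : ∀ x ∈ gs, x ≠ 0 := fun x hx => hz x (by simp [hx])
      rw [stepFold_cons]
      by_cases hp2 : p = -2
      · rw [if_pos hp2]
        have h1 : (stepFold g gs).natAbs ≤ (g * gs.prod).natAbs := natAbs_stepFold_le gs g hg hz'
        have h2 : (g * gs.prod) ≠ 0 := mul_ne_zero hg (prod_nonzero gs hz')
        have h3 : (g * gs.prod).natAbs ≥ 1 := by omega
        subst hp2
        rw [List.prod_cons]
        have h4 : ((-2 : Int) * (g * gs.prod)).natAbs = 2 * (g * gs.prod).natAbs := by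
          rw [Int.natAbs_mul]; norm_num
        rw [h4]
        omega
      · rw [if_neg hp2]
        have hrec : scanOk (p * g) gs = false := by
          simpa [scanOk, hp2] using h
        calc (stepFold (p * g) gs).natAbs < ((p * g) * gs.prod).natAbs :=
              ih (p * g) (mul_ne_zero hp hg) hz' hrec
          _ = (p * (g :: gs).prod).natAbs := by rw [List.prod_cons, mul_assoc]

-- a rejected scan makes A's output differ from B's
theorem loopL_ne_B (l : List (String × Int)) :
    okFresh l = false → ∀ acc, mergingLoopL l [] (-2) acc ≠ acc ++ mergingLoopB l := by
  suffices H : ∀ n (l : List (String × Int)), l.length ≤ n → okFresh l = false →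
      ∀ acc, mergingLoopL l [] (-2) acc ≠ acc ++ mergingLoopB l from H l.length l le_rfl
  intro n
  induction n with
  | zero =>
      intro l h hF
      have hl : l = [] := List.length_eq_zero_iff.mp (by omega)
      subst hl
      simp [okFresh] at hF
  | succ n ih =>
      intro l h hF acc
      match l, h, hF with
      | [], _, hF => simp [okFresh] at hF
      | (w, g) :: rest, h, hF =>
        have hrest : rest.length ≤ n := by simpa using h
        by_cases hg : g = 0
        · subst hg
          have hF' : okFresh rest = false := by simpa [okFresh] using hF
          rw [mergingLoopL, if_neg (by simp), mergingLoopB, if_pos rfl]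
          intro hc
          exact ih rest hrest hF' (acc ++ [((w, (0 : Int)) : String × Int)])
            (by simpa using hc)
        · have hR : okRun g rest = false := by simpa [okFresh, hg] using hF
          rw [loopL_run ((w, g) :: rest) w g rest rfl hg [] (-2) acc,
            mergingLoopB, if_neg hg, collectRun_eq]
          have hrw : runWordsL ((w, g) :: rest) = w :: runWordsL rest := by
            simp [runWordsL, List.takeWhile_cons, hg]
          have hrg : runGradesL ((w, g) :: rest) = g :: runGradesL rest := by
            simp [runGradesL, List.takeWhile_cons, hg]
          have hrem : remRunL ((w, g) :: rest) = remRunL rest := by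
            simp [remRunL, List.dropWhile_cons, hg]
          rw [hrw, hrg, hrem, stepFold_cons, if_pos rfl]
          rw [okRun_eq] at hR
          have hremlen : (remRunL rest).length ≤ n :=
            le_trans (List.length_dropWhile_le _ _) hrest
          by_cases hscan : scanOk g (runGradesL rest) = false
          · -- the reset fires in this run: the merged grades differ
            have hlt : (stepFold g (runGradesL rest)).natAbs
                < (g * (runGradesL rest).prod).natAbs :=
              natAbs_stepFold_lt (runGradesL rest) g hg (runGradesL_nonzero rest) hscan
            have hne : stepFold g (runGradesL rest) ≠ g * (runGradesL rest).prod := by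
              intro hc; rw [hc] at hlt; omega
            rw [loopL_acc]
            intro hc
            apply hne
            have hc2 : acc ++ (PySem.Str.join " " ([] ++ w :: runWordsL rest),
                  stepFold g (runGradesL rest))
                  :: mergingLoopL (remRunL rest) [] (-2) []
                = acc ++ (PySem.Str.join " " ([w] ++ runWordsL rest),
                  g * (runGradesL rest).prod) :: mergingLoopB (remRunL rest) := by
              simpa using hc
            have := List.append_cancel_left hc2
            have h5 := (List.cons.injEq _ _ _ _ ▸ this).1
            exact congrArg Prod.snd h5
          · -- the run is clean: the grades agree, recurse on the remainder
            have hscan' : scanOk g (runGradesL rest) = true := by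
              cases hb : scanOk g (runGradesL rest) with
              | false => exact absurd hb hscan
              | true => rfl
            have hfresh : okFresh (remRunL rest) = false := by
              rw [hscan'] at hR
              simpa using hR
            rw [stepFold_of_scanOk _ _ hscan']
            intro hc
            exact ih (remRunL rest) hremlen hfresh
              (acc ++ [(PySem.Str.join " " ([] ++ w :: runWordsL rest),
                g * (runGradesL rest).prod)])
              (by simpa using hc)

-- a single D_ witness, as a named condition for the converse scanner lemma
def Cseg (tw : List (String × Int)) (i t : Nat) : Prop :=
  (i = 0 ∨ (tw.map Prod.snd).getD (i - 1) 0 = 0) ∧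
  (((tw.map Prod.snd).drop i).take (t + 1)).prod = -2 ∧
  (tw.map Prod.snd).getD (i + t + 1) 0 ≠ 0

theorem notC_big (tw : List (String × Int)) (i t : Nat) (h : tw.length ≤ i + t + 1) :
    ¬ Cseg tw i t := by
  rintro ⟨-, -, h3⟩
  exact h3 (List.getD_eq_default _ _ (by simpa using h))

theorem notC_zero (tw : List (String × Int)) (i t s : Nat) (hs : s < tw.length)
    (h1 : i ≤ s) (h2 : s ≤ i + t) (hz : gradeAt tw s = 0) : ¬ Cseg tw i t := by
  rintro ⟨-, h2', -⟩
  have hlen1 : s - i < (((tw.map Prod.snd).drop i).take (t + 1)).length := by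
    simp only [List.length_take, List.length_drop, List.length_map]
    omega
  have hel : (((tw.map Prod.snd).drop i).take (t + 1))[s - i]'hlen1 = 0 := by
    rw [List.getElem_take, List.getElem_drop, List.getElem_map]
    have hsi : i + (s - i) = s := by omega
    rw [show tw[i + (s - i)]'(by omega) = tw[s]'hs from by congr 1]
    rw [gradeAt, List.getD_eq_getElem tw ("", 0) hs] at hz
    exact hz
  have hmem : (0 : Int) ∈ ((tw.map Prod.snd).drop i).take (t + 1) := by
    rw [← hel]; exact List.getElem_mem _
  rw [List.prod_eq_zero hmem] at h2'
  exact absurd h2' (by norm_num)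

-- the scanner accepting a suffix refutes every D_ witness at or past it
theorem convAux (tw : List (String × Int)) :
    ∀ n s, tw.length - s ≤ n →
      (okFresh (tw.drop s) = true → ∀ i t, s ≤ i → ¬ Cseg tw i t) ∧
      (∀ r, r < s → (∀ k, r ≤ k → k < s → gradeAt tw k ≠ 0) →
        okRun (((List.range (s - r)).map fun d => gradeAt tw (r + d)).prod) (tw.drop s) = true →
        (∀ t, s ≤ r + t + 1 → ¬ Cseg tw r t) ∧ (∀ i t, s ≤ i → ¬ Cseg tw i t)) := by
  intro n
  induction n with
  | zero =>
      intro s hs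
      refine ⟨fun _ i t hi => notC_big tw i t (by omega), fun r hr _ _ => ?_⟩
      exact ⟨fun t ht => notC_big tw r t (by omega), fun i t hi => notC_big tw i t (by omega)⟩
  | succ n ih =>
      intro s hs
      by_cases hlt : s < tw.length
      · have hdrop : tw.drop s = tw[s] :: tw.drop (s + 1) := List.drop_eq_getElem_cons hlt
        have hgs : gradeAt tw s = (tw[s]'hlt).2 := by
          rw [gradeAt, List.getD_eq_getElem tw ("", 0) hlt]
        constructor
        · intro hok i t hi
          rw [hdrop] at hok
          rcases hts : tw[s] with ⟨w, g⟩
          rw [hts] at hok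
          by_cases hg : g = 0
          · have hok' : okFresh (tw.drop (s + 1)) = true := by simpa [okFresh, hg] using hok
            by_cases his : i = s
            · subst his
              exact notC_zero tw i t i hlt le_rfl (by omega) (by rw [hgs, hts]; exact hg)
            · exact ((ih (s + 1) (by omega)).1 hok') i t (by omega)
          · have hok' : okRun g (tw.drop (s + 1)) = true := by simpa [okFresh, hg] using hok
            have hmid := (ih (s + 1) (by omega)).2 s (by omega)
              (fun k h1 h2 => by
                have : k = s := by omega
                subst this
                rw [hgs, hts]; simpa using hg)
              (by simpa [show s + 1 - s = 1 from by omega, List.range_succ, hgs, hts] using hok')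
            by_cases his : i = s
            · subst his; exact hmid.1 t (by omega)
            · exact hmid.2 i t (by omega)
        · intro r hr hnz hok
          rw [hdrop] at hok
          rcases hts : tw[s] with ⟨w, g⟩
          rw [hts] at hok
          by_cases hg : g = 0
          · have hok' : okFresh (tw.drop (s + 1)) = true := by simpa [okRun, hg] using hok
            have hfr := (ih (s + 1) (by omega)).1 hok'
            constructor
            · intro t htge
              by_cases hbig : tw.length ≤ r + t + 1
              · exact notC_big tw r t hbig
              · by_cases hts2 : r + t + 1 = s
                · rintro ⟨-, -, h3⟩
                  exact h3 (by rw [getD_map_snd, hts2, hgs, hts]; exact hg)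
                · exact notC_zero tw r t s hlt (by omega) (by omega) (by rw [hgs, hts]; exact hg)
            · intro i t hi
              by_cases his : i = s
              · rintro ⟨hb, -, -⟩
                rcases hb with hb | hb
                · omega
                · rw [getD_map_snd] at hb
                  exact hnz (i - 1) (by omega) (by omega) hb
              · exact hfr i t (by omega)
          · have hok2 := hok
            rw [okRun, if_pos (by simpa using hg), Bool.and_eq_true, decide_eq_true_iff] at hok2
            have hP : (((List.range (s - r)).map fun d => gradeAt tw (r + d)).prod) ≠ -2 :=
              hok2.1
            have hprod : ((List.range (s + 1 - r)).map fun d => gradeAt tw (r + d)).prod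
                = (((List.range (s - r)).map fun d => gradeAt tw (r + d)).prod) * g := by
              have h2 : s + 1 - r = (s - r) + 1 := by omega
              rw [h2, List.range_succ]
              simp [show r + (s - r) = s from by omega, hgs, hts]
            have hmid := (ih (s + 1) (by omega)).2 r (by omega)
              (fun k h1 h2 => by
                by_cases hk : k = s
                · subst hk; rw [hgs, hts]; simpa using hg
                · exact hnz k h1 (by omega))
              (by rw [hprod]; exact hok2.2)
            constructor
            · intro t htge
              by_cases hts2 : r + t + 1 = s
              · rintro ⟨-, h2', -⟩
                apply hP
                rw [← h2', show t + 1 = s - r from by omega,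
                  take_drop_map_snd tw r (s - r) (by omega)]
              · exact hmid.1 t (by omega)
            · intro i t hi
              by_cases his : i = s
              · rintro ⟨hb, -, -⟩
                rcases hb with hb | hb
                · omega
                · rw [getD_map_snd] at hb
                  exact hnz (i - 1) (by omega) (by omega) hb
              · exact hmid.2 i t (by omega)
      · refine ⟨fun _ i t hi => notC_big tw i t (by omega), fun r hr _ _ => ?_⟩
        exact ⟨fun t ht => notC_big tw r t (by omega), fun i t hi => notC_big tw i t (by omega)⟩

theorem okFresh_false_of_D (tw : List (String × Int)) (hd : D_merging_word tw) :
    okFresh tw = false := by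
  cases hb : okFresh tw with
  | false => rfl
  | true =>
      exfalso
      obtain ⟨i, hi, t, ht, hC⟩ := hd
      exact ((convAux tw tw.length 0 (by omega)).1 (by simpa using hb)) i t (by omega) hC

-- ===== VERDICT (by name: the statement is the Claim_ definition above) =====
theorem merging_word_spec : Claim_unchanged_merging_word := by
  intro tw _ hD
  unfold merging_word merging_word_alt
  rw [mergingLoopA_eq_L]
  simpa using (loopL_eq_B tw).1 (okFresh_of_notD tw hD) []

theorem merging_word_tight : Claim_exact_merging_word := by
  intro tw _ hd
  unfold merging_word merging_word_alt
  rw [mergingLoopA_eq_L]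
  simpa using loopL_ne_B tw (okFresh_false_of_D tw hd) []

theorem merging_word_changed : Claim_changed_merging_word := by
  unfold Claim_changed_merging_word
  refine ⟨by decide, by decide, ?_, ?_, by decide⟩
  · show merging_word _ = _
    unfold merging_word
    rw [mergingLoopA_eq_L]
    decide
  · show merging_word_alt _ = _
    simp only [merging_word_alt, pvDiffWitness_merging_word, pvDiffWitnessOut_merging_word]
    rw [mergingLoopB.eq_def]
    norm_num [collectRun]
    rw [mergingLoopB.eq_def]
    decide
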